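/- GENERATED by farm/mkstatement.py from design/units.tsv (unit `DGifCloseFile.4`) and the assertions of Gif/Spec/Seg_DGifCloseFile.lean — do not edit.
   THE STATEMENT of the proof unit `DGifCloseFile.4`: segment 4 of `DGifCloseFile` (3 instructions; entries 0x109d06;
   exits 0x109d13; ranges 0x109d06-0x109d13)
   takes each of its entry assertions to one of its exit assertions (`Gif.Spec.DGifCloseFile.Seg4`), given the contracts of its callees.
   What the names mean: ProgX/Base/Spec/Basic.lean (the shared hypotheses), Gif/Spec/Seg_DGifCloseFile.lean (the assertions). The theorem to prove:
   `theorem DGifCloseFile_4_ok : Gif.Spec.DGifCloseFile_4.Statement`. -/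
import Gif.Code
import Gif.Dec.All
import Gif.Labels
import Gif.Spec.Alloc
import Gif.Spec.Seg_DGifCloseFile
namespace Gif.Spec.DGifCloseFile_4
open X86 X86.User Asan

/-- The statement of unit `DGifCloseFile.4`. -/
def Statement : Prop :=
  ∀ (Lay : Layout) (_hLay : Lay.hi = 0x1000000) (μ : Microarch) (_hμ : UserX.MicroOK μ) (u₀ : State)
    (_hcode : HasCodeNat Lay u₀ Gif.L.DGifCloseFile.entry Gif.Code.code_DGifCloseFile.nat Gif.L.DGifCloseFile.size)
    (_h_GifFreeExtensions : ∀ (H : Heap) (rest : List Obj) (frames : List (Nat × FrameLayout)) (e : Option Exts) (ob on : Nat), Calls Lay μ ProgX.Base.WayInv (ProgX.Base.conv u₀) Gif.L.GifFreeExtensions.entry (Gif.Spec.GifFreeExtensions.spec H rest frames e ob on)),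
    Gif.Spec.DGifCloseFile.Seg4 Lay μ u₀

end Gif.Spec.DGifCloseFile_4
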